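-- pv_equiv track=rewrite | github.com/williamluer/adventofcode | 2025/3.py | largest_two_digits
-- ===== SOURCE A (Python) =====
-- import heapq
--
-- def largest_two_digits(vals: list[int]) -> int:
--     max_to_n = vals[-1]
--     maxes = [vals[-1]]
--     for n in reversed(vals[:-1]):
--         maxes.append(max(maxes[-1], n))
--     maxes.reverse()
--
--     two_largest = heapq.nlargest(2, vals)
--
--     max_val = 0
--     for option in two_largest:
--         l = option
--         i = vals.index(l)
--         if i < len(vals) - 1:
--             r = maxes[i+1]
--             max_val = max(max_val, l * 10 + r)
--
--     return max_val
-- ===== SOURCE B (Python) =====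
-- def largest_two_digits(vals: list[int]) -> int:
--     top = sorted(vals, reverse=True)[:2]
--     max_val = 0
--     for l in top:
--         i = vals.index(l)
--         if i < len(vals) - 1:
--             max_val = max(max_val, l * 10 + max(vals[i + 1:]))
--     return max_val
-- ===== Notes on version B (the rewrite author's own statement) =====
-- stated objective: simpler
-- what changed: B drops A's suffix-maxima array (append loop plus reverse) and instead, for each of the two largest values, takes max() of the tail slice after its first index directly.
import Mathlib
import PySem

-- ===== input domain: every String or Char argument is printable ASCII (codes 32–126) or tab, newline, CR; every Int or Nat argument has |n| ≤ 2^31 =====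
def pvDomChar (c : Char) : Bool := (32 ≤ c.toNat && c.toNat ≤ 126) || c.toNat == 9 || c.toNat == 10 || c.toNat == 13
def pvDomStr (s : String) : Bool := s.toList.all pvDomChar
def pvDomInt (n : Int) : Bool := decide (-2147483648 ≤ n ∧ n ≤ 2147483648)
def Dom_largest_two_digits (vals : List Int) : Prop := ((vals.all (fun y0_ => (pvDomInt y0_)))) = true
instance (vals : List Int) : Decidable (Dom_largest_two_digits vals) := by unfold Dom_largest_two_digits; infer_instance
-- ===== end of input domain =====

-- B drops A's suffix-maxima array and instead scans the tail after each candidate's first index directly: simpler, same result.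

-- ===== PORT A =====
-- heapq.nlargest(2, vals) is ported as sorted(vals, reverse=True)[:2], its documented meaning.
def largest_two_digits (vals : List Int) : Int :=
  let max_to_n := PySem.List.pyGetD vals (-1) 0   -- vals[-1]; Pre_ excludes the empty list where this raises
  let maxesRev := (PySem.List.slice vals none (some (-1))).reverse.foldl
      (fun maxes n => maxes ++ [max (PySem.List.pyGetD maxes (-1) 0) n]) [max_to_n]
  let maxes := maxesRev.reverse
  let two_largest := (PySem.List.sorted vals (fun x => x) true).take 2
  two_largest.foldl (fun max_val option =>
    match PySem.List.index? vals option with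
    | some i =>
        if (i : Int) < (vals.length : Int) - 1 then
          max max_val (option * 10 + PySem.List.pyGetD maxes ((i : Int) + 1) 0)
        else max_val
    | none => max_val) 0

-- ===== PORT B =====
def largest_two_digits_alt (vals : List Int) : Int :=
  let top := (PySem.List.sorted vals (fun x => x) true).take 2
  top.foldl (fun max_val l =>
    match PySem.List.index? vals l with
    | some i =>
        if (i : Int) < (vals.length : Int) - 1 then
          -- max(vals[i+1:]); the branch guard makes the slice nonempty, so max? is some
          max max_val (l * 10 +
            ((PySem.List.max? (PySem.List.slice vals (some ((i : Int) + 1)) none) (fun x => x)).getD 0))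
        else max_val
    | none => max_val) 0

-- ===== PRECONDITION & SPEC =====
-- Pre_ excludes only the empty list, on which A raises IndexError (vals[-1]).
def Pre_largest_two_digits (vals : List Int) : Prop := vals ≠ []
instance (vals : List Int) : Decidable (Pre_largest_two_digits vals) := by unfold Pre_largest_two_digits; infer_instance
def pvWitness_largest_two_digits : List Int := [3, 1]

def Spec_largest_two_digits (vals : List Int) (out : Int) : Prop := out = largest_two_digits_alt vals
instance (vals : List Int) (out : Int) : Decidable (Spec_largest_two_digits vals out) := by unfold Spec_largest_two_digits; infer_instance

-- ===== CLAIM (what is proved, stated in full; the proofs are below) =====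
def Claim_equal_largest_two_digits : Prop := ∀ (vals : List Int), Dom_largest_two_digits vals → Pre_largest_two_digits vals → Spec_largest_two_digits vals (largest_two_digits vals)

-- ===== LEMMAS AND PROOFS =====

-- suffix maxima of a list: entry k is max(l[k:])
def sufMaxes : List Int → List Int
  | [] => []
  | x :: xs => (xs.foldl max x) :: sufMaxes xs

-- the value A's append loop builds, written structurally
def pvScan : Int → List Int → List Int
  | b, [] => [b]
  | b, n :: ns => b :: pvScan (max b n) ns

theorem foldl_step_append : ∀ (ns acc : List Int) (b : Int),
    List.foldl (fun m n => m ++ [max (PySem.List.pyGetD m (-1) 0) n]) (acc ++ [b]) ns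
      = acc ++ pvScan b ns := by
  intro ns
  induction ns with
  | nil => intro acc b; simp [pvScan]
  | cons n ns ih =>
    intro acc b
    simp only [List.foldl_cons, PySem.List.pyGetD_neg_one_append_singleton, pvScan]
    rw [List.append_assoc acc [b] [max b n]]
    have := ih (acc ++ [b]) (max b n)
    simpa [List.append_assoc] using this

theorem foldl_max_append_pair (zs : List Int) (z y b : Int) :
    List.foldl max z (zs ++ [y, b]) = List.foldl max z (zs ++ [max y b]) := by
  simp [List.foldl_append, max_assoc]

theorem sufMaxes_append_pair : ∀ (zs : List Int) (y b : Int),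
    sufMaxes (zs ++ [y, b]) = sufMaxes (zs ++ [max y b]) ++ [b] := by
  intro zs
  induction zs with
  | nil => intro y b; simp [sufMaxes]
  | cons z zs ih =>
    intro y b
    simp only [List.cons_append, sufMaxes, ih, List.cons_append, foldl_max_append_pair]

theorem pvScan_eq_sufMaxes_reverse : ∀ (ys : List Int) (b : Int),
    pvScan b ys = (sufMaxes (ys.reverse ++ [b])).reverse := by
  intro ys
  induction ys with
  | nil => intro b; simp [pvScan, sufMaxes]
  | cons y ys ih =>
    intro b
    have h2 : (y :: ys).reverse ++ [b] = ys.reverse ++ [y, b] := by simp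
    rw [pvScan, ih, h2, sufMaxes_append_pair, max_comm b y]
    simp

theorem sufMaxes_getElem? : ∀ (l : List Int) (k : Nat), k < l.length →
    (sufMaxes l)[k]? = PySem.List.max? (l.drop k) (fun x => x) := by
  intro l
  induction l with
  | nil => intro k hk; simp at hk
  | cons x xs ih =>
    intro k hk
    cases k with
    | zero => simp [sufMaxes, PySem.List.max?_id_cons]
    | succ k =>
      simp only [sufMaxes, List.getElem?_cons_succ, List.drop_succ_cons]
      exact ih k (by simpa using hk)

theorem maxes_eq_sufMaxes (vals : List Int) (h : vals ≠ []) :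
    ((PySem.List.slice vals none (some (-1))).reverse.foldl
        (fun m n => m ++ [max (PySem.List.pyGetD m (-1) 0) n])
        [PySem.List.pyGetD vals (-1) 0]).reverse = sufMaxes vals := by
  rw [PySem.List.slice_to_neg_one]
  simp only [PySem.List.pyGetD_neg_one vals 0 h]
  have h1 := foldl_step_append vals.dropLast.reverse [] (vals.getLast h)
  simp only [List.nil_append] at h1
  rw [h1, pvScan_eq_sufMaxes_reverse, List.reverse_reverse, List.reverse_reverse,
      List.dropLast_append_getLast h]

theorem main_eq (vals : List Int) (h : vals ≠ []) :
    largest_two_digits vals = largest_two_digits_alt vals := by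
  unfold largest_two_digits largest_two_digits_alt
  simp only []
  congr 1
  funext acc l
  cases hidx : PySem.List.index? vals l with
  | none => rfl
  | some i =>
    simp only []
    split_ifs with hlt
    · congr 2
      obtain ⟨hk, _, _⟩ := PySem.List.getElem_of_index?_eq_some hidx
      have hi1 : i + 1 < vals.length := by omega
      rw [maxes_eq_sufMaxes vals h]
      have hcast : ((i : Int) + 1) = ((i + 1 : Nat) : Int) := by push_cast; ring
      rw [hcast, PySem.List.pyGetD_natCast, PySem.List.slice_from_natCast]
      rw [List.getD_eq_getElem?_getD, sufMaxes_getElem? vals (i+1) hi1]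
    · rfl

-- ===== VERDICT (by name: the statement is the Claim_ definition above) =====
theorem largest_two_digits_spec : Claim_equal_largest_two_digits := by
  intro vals _ hpre
  unfold Spec_largest_two_digits
  exact main_eq vals hpre
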